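-- pv_equiv track=rewrite | github.com/Kviiri/lcl-toolkit | lcl_utils.py | int_to_tile
-- ===== SOURCE A (Python) =====
-- def int_to_tile(code, width):
--     ret = set()
--     index = 0
--     while 2**index <= code:
--         if code & (2**index):
--             ret.add((index%width, index//width))
--         index += 1
--     return ret
-- ===== SOURCE B (Python) =====
-- def int_to_tile(code, width):
--     ret = set()
--     while code > 0:
--         lsb = code & -code
--         index = lsb.bit_length() - 1
--         ret.add((index % width, index // width))
--         code ^= lsb
--     return ret
-- ===== Notes on version B (the rewrite author's own statement) =====
-- stated objective: alternative
-- what changed: B iterates only over the set bits of code, isolating the lowest set bit with code & -code and clearing it with xor, instead of A's scan of every bit position with a freshly computed 2**index mask per position.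
import Mathlib
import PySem

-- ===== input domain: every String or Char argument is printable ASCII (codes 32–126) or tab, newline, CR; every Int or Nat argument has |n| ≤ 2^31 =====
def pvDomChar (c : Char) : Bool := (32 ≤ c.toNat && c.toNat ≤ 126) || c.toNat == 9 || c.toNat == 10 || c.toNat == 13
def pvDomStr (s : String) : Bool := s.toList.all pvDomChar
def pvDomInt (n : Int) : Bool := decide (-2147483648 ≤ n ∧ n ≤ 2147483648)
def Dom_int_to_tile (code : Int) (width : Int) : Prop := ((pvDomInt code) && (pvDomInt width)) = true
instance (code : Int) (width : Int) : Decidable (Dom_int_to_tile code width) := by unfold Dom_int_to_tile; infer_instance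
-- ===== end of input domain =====

-- B replaces A's scan of every bit position (with a fresh 2**index mask each step) by a loop
-- over just the set bits, isolating the lowest one with code & -code; return values are equal.

-- ===== PORT A =====
-- A's while loop; the fuel 64 only makes the recursion total: on Dom (code ≤ 2^31) the loop
-- exits via its own test 2^index > code after at most 33 iterations, so fuel never runs out.
def intToTileLoopA : Nat → Int → Int → Nat → PySem.Set (Int × Int) → PySem.Set (Int × Int)
  | 0, _, _, _, ret => ret
  | fuel+1, code, width, index, ret =>
      if (2:Int)^index ≤ code then
        intToTileLoopA fuel code width (index+1)
          (if PySem.Int.band code ((2:Int)^index) ≠ 0 then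
             PySem.Set.add ret (PySem.Int.mod (index : Int) width, PySem.Int.floordiv (index : Int) width)
           else ret)
      else ret

def int_to_tile (code : Int) (width : Int) : List (Int × Int) :=
  intToTileLoopA 64 code width 0 PySem.Set.empty

-- ===== PORT B =====
-- B's while loop; fuel 64 only for totality: each pass clears one set bit and on Dom code has
-- at most 32 set bits. lsb.bit_length() - 1 is PySem.Int.bitLength lsb - 1 (Python-exact).
def intToTileLoopB : Nat → Int → Int → PySem.Set (Int × Int) → PySem.Set (Int × Int)
  | 0, _, _, ret => ret
  | fuel+1, code, width, ret =>
      if 0 < code then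
        let lsb := PySem.Int.band code (-code)
        let index : Int := (PySem.Int.bitLength lsb : Int) - 1
        intToTileLoopB fuel (PySem.Int.bxor code lsb) width
          (PySem.Set.add ret (PySem.Int.mod index width, PySem.Int.floordiv index width))
      else ret

def int_to_tile_alt (code : Int) (width : Int) : List (Int × Int) :=
  intToTileLoopB 64 code width PySem.Set.empty

-- ===== PRECONDITION & SPEC =====
-- Pre_ excludes only code > 0 with width = 0, where the Python A raises ZeroDivisionError
-- at index % width (B raises there too).
def Pre_int_to_tile (code : Int) (width : Int) : Prop := code ≤ 0 ∨ width ≠ 0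
instance (code : Int) (width : Int) : Decidable (Pre_int_to_tile code width) := by
  unfold Pre_int_to_tile; infer_instance
def pvWitness_int_to_tile : Int × Int := (5, 3)

def Spec_int_to_tile (code : Int) (width : Int) (out : List (Int × Int)) : Prop := out = int_to_tile_alt code width
instance (code : Int) (width : Int) (out : List (Int × Int)) : Decidable (Spec_int_to_tile code width out) := by unfold Spec_int_to_tile; infer_instance

-- ===== CLAIM (what is proved, stated in full; the proofs are below) =====
def Claim_equal_int_to_tile : Prop := ∀ (code : Int) (width : Int), Dom_int_to_tile code width → Pre_int_to_tile code width → Spec_int_to_tile code width (int_to_tile code width)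

-- ===== LEMMAS AND PROOFS =====

-- the common shape both loops reduce to: fold the tile-insertions over a list of bit indices
def pvFold (w : Int) (l : List Nat) (ret : PySem.Set (Int × Int)) : PySem.Set (Int × Int) :=
  l.foldl (fun s j => PySem.Set.add s (PySem.Int.mod (j : Int) w, PySem.Int.floordiv (j : Int) w)) ret

-- set-bit indices of n below 64, in increasing order
def pvBits (n : Nat) : List Nat := (List.range 64).filter n.testBit

theorem pvFold_cons (w : Int) (j : Nat) (l : List Nat) (ret : PySem.Set (Int × Int)) :
    pvFold w (j :: l) ret
      = pvFold w l (PySem.Set.add ret (PySem.Int.mod (j : Int) w, PySem.Int.floordiv (j : Int) w)) := rfl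

-- ---- A's loop computes the fold over the set bits in [i, i+fuel) ----
theorem loopA_eq (w : Int) : ∀ (fuel i : Nat) (n : Nat) (ret : PySem.Set (Int × Int)),
    n < 2 ^ (i + fuel) →
    intToTileLoopA fuel (n : Int) w i ret = pvFold w ((List.range' i fuel).filter n.testBit) ret := by
  intro fuel
  induction fuel with
  | zero => intro i n ret _; simp [intToTileLoopA, pvFold]
  | succ f ih =>
    intro i n ret hlt
    rw [intToTileLoopA]
    have hcast : ((2:Int)^i) = ((2^i : Nat) : Int) := by push_cast; ring
    by_cases hle : 2 ^ i ≤ n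
    · have hcond : (2:Int)^i ≤ (n : Int) := by rw [hcast]; exact_mod_cast hle
      rw [if_pos hcond]
      have hband : PySem.Int.band (n : Int) ((2:Int)^i) = ((n &&& 2^i : Nat) : Int) := by
        rw [hcast]; exact PySem.Int.band_natCast n (2^i)
      have hltf : n < 2 ^ (i + 1 + f) := by
        have h : i + 1 + f = i + (f+1) := by omega
        rw [h]; exact hlt
      by_cases hbit : n.testBit i = true
      · have hne : PySem.Int.band (n : Int) ((2:Int)^i) ≠ 0 := by
          rw [hband, Nat.and_two_pow, hbit]
          have hp := Nat.two_pow_pos i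
          intro hcontra
          have h' : (Bool.toNat true * 2 ^ i : Nat) = 0 := by exact_mod_cast hcontra
          simp only [Bool.toNat_true, one_mul] at h'
          omega
        rw [if_pos hne,
            ih (i+1) n (PySem.Set.add ret (PySem.Int.mod (i : Int) w, PySem.Int.floordiv (i : Int) w)) hltf,
            List.range'_succ, List.filter_cons, hbit, if_pos rfl, pvFold_cons]
      · have heq0 : PySem.Int.band (n : Int) ((2:Int)^i) = 0 := by
          rw [hband, Nat.and_two_pow]
          simp at hbit
          simp [hbit]
        rw [if_neg (by simp [heq0]), ih (i+1) n ret hltf, List.range'_succ, List.filter_cons]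
        simp only [hbit, Bool.false_eq_true, if_false]
    · have hcond : ¬ ((2:Int)^i ≤ (n : Int)) := by rw [hcast]; exact_mod_cast hle
      rw [if_neg hcond]
      have hempty : (List.range' i (f+1)).filter n.testBit = [] := by
        rw [List.filter_eq_nil_iff]
        intro j hj
        have hij : i ≤ j := (List.mem_range'_1.mp hj).1
        have : n < 2 ^ j := lt_of_lt_of_le (by omega) (Nat.pow_le_pow_right (by norm_num) hij)
        simp [Nat.testBit_eq_false_of_lt this]
      rw [hempty]; rfl

-- ---- lowest-set-bit facts, from the decomposition n = 2^(k+1)*m + 2^k ----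
theorem pv_decomp {n : Nat} (h : 0 < n) : ∃ k m, n = 2 ^ (k+1) * m + 2 ^ k := by
  obtain ⟨k, o, ho, hko⟩ := Nat.exists_eq_two_pow_mul_odd (Nat.pos_iff_ne_zero.mp h)
  obtain ⟨m, hm⟩ := ho
  exact ⟨k, m, by subst hko hm; ring⟩

theorem pv_testBit {n k m : Nat} (hn : n = 2 ^ (k+1) * m + 2 ^ k) (j : Nat) :
    n.testBit j = (if j < k then false else if j = k then true else m.testBit (j - (k+1))) := by
  subst hn
  rw [Nat.testBit_two_pow_mul_add m (Nat.pow_lt_pow_right (by norm_num) (Nat.lt_succ_self k)) j]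
  rcases lt_trichotomy j k with hjk | hjk | hjk
  · simp [hjk, Nat.lt_succ_of_lt hjk, Nat.ne_of_gt hjk]
  · subst hjk; simp
  · have : ¬ j < k + 1 := by omega
    simp [this, Nat.ne_of_gt hjk, Nat.lt_asymm hjk]

theorem pv_testBit_rest {k m : Nat} (j : Nat) :
    (2 ^ (k+1) * m).testBit j = (if j ≤ k then false else m.testBit (j - (k+1))) := by
  have h0 : (0:Nat) < 2 ^ (k+1) := Nat.two_pow_pos _
  have := Nat.testBit_two_pow_mul_add m (i := k+1) h0 j
  rw [Nat.add_zero] at this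
  rw [this]
  by_cases hj : j < k + 1
  · simp [hj, Nat.le_of_lt_succ hj, Nat.zero_testBit]
  · simp [hj, show ¬ j ≤ k by omega]

theorem pv_and_pred {n k m : Nat} (hn : n = 2 ^ (k+1) * m + 2 ^ k) :
    n &&& (n - 1) = 2 ^ (k+1) * m := by
  have hk0 : (0:Nat) < 2 ^ k := Nat.two_pow_pos _
  have hpred : n - 1 = 2 ^ (k+1) * m + (2 ^ k - 1) := by omega
  apply Nat.eq_of_testBit_eq
  intro j
  rw [Nat.testBit_and, pv_testBit hn, hpred,
      Nat.testBit_two_pow_mul_add m (by have := Nat.pow_lt_pow_right (a := 2) (by norm_num) (Nat.lt_succ_self k); omega) j,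
      pv_testBit_rest]
  rcases lt_trichotomy j k with hjk | hjk | hjk
  · simp [hjk, Nat.le_of_lt hjk]
  · subst hjk
    simp [Nat.testBit_two_pow_sub_one]
  · have h1 : ¬ j < k := Nat.lt_asymm hjk
    have h2 : j ≠ k := Nat.ne_of_gt hjk
    have h3 : ¬ j < k + 1 := by omega
    have h4 : ¬ j ≤ k := by omega
    simp [h1, h2, h3, h4]

theorem pv_xor_lsb {n k m : Nat} (hn : n = 2 ^ (k+1) * m + 2 ^ k) :
    n ^^^ 2 ^ k = 2 ^ (k+1) * m := by
  apply Nat.eq_of_testBit_eq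
  intro j
  rw [Nat.testBit_xor, pv_testBit hn, Nat.testBit_two_pow, pv_testBit_rest]
  rcases lt_trichotomy j k with hjk | hjk | hjk
  · simp [hjk, Nat.le_of_lt hjk, Nat.ne_of_gt hjk]
  · subst hjk; simp
  · have h1 : ¬ j < k := Nat.lt_asymm hjk
    have h2 : j ≠ k := Nat.ne_of_gt hjk
    have h4 : ¬ j ≤ k := by omega
    simp [h1, h2, h4, Ne.symm h2]

-- code & -code on a positive Int, through PySem.Int.band's definition
theorem pv_band_neg {n : Nat} (h : 0 < n) :
    PySem.Int.band (n : Int) (-(n : Int)) = ((n - (n &&& (n - 1)) : Nat) : Int) := by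
  have h1 : (0:Int) ≤ (n : Int) := Int.natCast_nonneg n
  have h2 : ¬ (0:Int) ≤ -(n : Int) := by
    simp only [not_le]
    exact neg_neg_of_pos (by exact_mod_cast h)
  unfold PySem.Int.band
  rw [if_pos h1, if_neg h2]
  congr 1
  have ha : ((n : Int)).toNat = n := Int.toNat_natCast n
  have hb : (-(-(n : Int)) - 1).toNat = n - 1 := by
    rw [neg_neg]
    omega
  rw [ha, hb]

theorem pv_bitLength_pow (k : Nat) : PySem.Int.bitLength ((2 ^ k : Nat) : Int) = k + 1 := by
  induction k with
  | zero => decide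
  | succ k ih =>
    rw [PySem.Int.bitLength_natCast (Nat.two_pow_pos _)]
    have : 2 ^ (k+1) / 2 = 2 ^ k := by
      rw [Nat.pow_succ]; exact Nat.mul_div_cancel _ (by norm_num)
    rw [this, ih]

-- removing the lowest set bit removes the head of the bit-index list
theorem pv_bits_cons {n k m : Nat} (hn : n = 2 ^ (k+1) * m + 2 ^ k) (h64 : n < 2 ^ 64) :
    pvBits n = k :: pvBits (2 ^ (k+1) * m) := by
  have hk64 : k < 64 := by
    have h1 : 2 ^ k ≤ n := by omega
    by_contra hc
    have : (64:Nat) ≤ k := by omega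
    have : (2:Nat) ^ 64 ≤ 2 ^ k := Nat.pow_le_pow_right (by norm_num) this
    omega
  have hsplit : (64:Nat) = (k+1) + (63-k) := by omega
  unfold pvBits
  rw [hsplit, List.range_add, List.filter_append, List.filter_append, List.range_succ,
      List.filter_append, List.filter_append]
  have hlow_n : (List.range k).filter n.testBit = [] := by
    rw [List.filter_eq_nil_iff]
    intro j hj
    have := List.mem_range.mp hj
    simp [pv_testBit hn, this]
  have hlow_n' : (List.range k).filter (2 ^ (k+1) * m).testBit = [] := by
    rw [List.filter_eq_nil_iff]
    intro j hj
    have := List.mem_range.mp hj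
    simp [pv_testBit_rest, Nat.le_of_lt this]
  have hk_n : [k].filter n.testBit = [k] := by
    simp [List.filter, pv_testBit hn]
  have hk_n' : [k].filter (2 ^ (k+1) * m).testBit = [] := by
    simp [List.filter, pv_testBit_rest]
  have hrest : ((List.range (63-k)).map (fun x => (k+1) + x)).filter n.testBit
      = ((List.range (63-k)).map (fun x => (k+1) + x)).filter (2 ^ (k+1) * m).testBit := by
    apply List.filter_congr
    intro x hx
    obtain ⟨y, _, rfl⟩ := List.mem_map.mp hx
    have h1 : ¬ (k+1) + y < k := by omega
    have h2 : (k+1) + y ≠ k := by omega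
    have h3 : ¬ (k+1) + y ≤ k := by omega
    simp [pv_testBit hn, pv_testBit_rest, h1, h2, h3]
  rw [hlow_n, hlow_n', hk_n, hk_n', hrest]
  rfl

-- ---- B's loop computes the same fold ----
theorem loopB_eq (w : Int) : ∀ (n : Nat), n < 2 ^ 64 →
    ∀ (fuel : Nat) (ret : PySem.Set (Int × Int)), (pvBits n).length ≤ fuel →
    intToTileLoopB fuel (n : Int) w ret = pvFold w (pvBits n) ret := by
  intro n
  induction n using Nat.strong_induction_on with
  | _ n ih =>
    intro h64 fuel ret hfuel
    by_cases hn : 0 < n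
    · obtain ⟨k, m, hdec⟩ := pv_decomp hn
      have hcons := pv_bits_cons hdec h64
      have hlen : 0 < (pvBits n).length := by rw [hcons]; simp
      obtain ⟨f, rfl⟩ : ∃ f, fuel = f + 1 := ⟨fuel - 1, by omega⟩
      rw [intToTileLoopB]
      have hpos : (0:Int) < (n : Int) := by exact_mod_cast hn
      rw [if_pos hpos]
      have hand := pv_and_pred hdec
      have hlsb : PySem.Int.band (n : Int) (-(n : Int)) = ((2 ^ k : Nat) : Int) := by
        rw [pv_band_neg hn, hand]
        have hsub : n - 2 ^ (k+1) * m = 2 ^ k := by rw [hdec, Nat.add_sub_cancel_left]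
        rw [hsub]
      simp only [hlsb]
      have hidx : ((PySem.Int.bitLength ((2 ^ k : Nat) : Int) : Int) - 1) = ((k : Nat) : Int) := by
        rw [pv_bitLength_pow]; push_cast; ring
      rw [hidx]
      have hxor : PySem.Int.bxor (n : Int) ((2 ^ k : Nat) : Int) = ((2 ^ (k+1) * m : Nat) : Int) := by
        rw [PySem.Int.bxor_natCast, pv_xor_lsb hdec]
      rw [hxor]
      have hk0 : (0:Nat) < 2 ^ k := Nat.two_pow_pos _
      have hlt : 2 ^ (k+1) * m < n := by
        rw [hdec]
        have := Nat.two_pow_pos k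
        omega
      have hrec := ih (2 ^ (k+1) * m) hlt (lt_trans hlt h64) f
        (PySem.Set.add ret (PySem.Int.mod ((k : Nat) : Int) w, PySem.Int.floordiv ((k : Nat) : Int) w))
        (by have h := hfuel
            rw [hcons] at h
            simp only [List.length_cons] at h
            omega)
      rw [hrec, hcons, pvFold_cons]
    · have hn0 : n = 0 := by omega
      subst hn0
      have hbits : pvBits 0 = [] := by
        unfold pvBits
        rw [List.filter_eq_nil_iff]
        intro j _
        simp [Nat.zero_testBit]
      rw [hbits]
      cases fuel with
      | zero => rfl
      | succ f =>
        rw [intToTileLoopB]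
        have h0 : ¬ ((0:Int) < ((0:Nat) : Int)) := by simp
        rw [if_neg h0]
        rfl

-- when code <= 0 neither loop ever runs
theorem loopA_nonpos (w code : Int) (i : Nat) (ret : PySem.Set (Int × Int)) (f : Nat)
    (h : code ≤ 0) : intToTileLoopA (f+1) code w i ret = ret := by
  rw [intToTileLoopA]
  apply if_neg
  have hp : (0:Int) < 2 ^ i := by positivity
  omega

theorem loopB_nonpos (w code : Int) (ret : PySem.Set (Int × Int)) (f : Nat)
    (h : code ≤ 0) : intToTileLoopB (f+1) code w ret = ret := by
  rw [intToTileLoopB]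
  exact if_neg (by omega)

-- ===== VERDICT (by name: the statement is the Claim_ definition above) =====
theorem int_to_tile_spec : Claim_equal_int_to_tile := by
  intro code width hdom _
  unfold Spec_int_to_tile int_to_tile int_to_tile_alt
  by_cases hpos : 0 < code
  · have hc : code = ((code.toNat : Nat) : Int) := by omega
    set n := code.toNat with hn
    have hn31 : n ≤ 2 ^ 31 := by
      have := hdom
      unfold Dom_int_to_tile pvDomInt at this
      simp at this
      omega
    have h64 : n < 2 ^ 64 := by
      have : (2:Nat) ^ 31 < 2 ^ 64 := by norm_num
      omega
    rw [hc]
    rw [loopA_eq width 64 0 n PySem.Set.empty (by simpa using h64)]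
    rw [loopB_eq width n h64 64 PySem.Set.empty
        (le_trans (List.length_filter_le _ _) (by simp [List.length_range]))]
    have hb : pvBits n = (List.range' 0 64).filter n.testBit := by
      unfold pvBits
      rw [List.range_eq_range']
    rw [hb]
  · have hle0 : code ≤ 0 := Int.not_lt.mp hpos
    calc intToTileLoopA 64 code width 0 PySem.Set.empty
        = PySem.Set.empty := loopA_nonpos width code 0 PySem.Set.empty 63 hle0
      _ = intToTileLoopB 64 code width PySem.Set.empty :=
        (loopB_nonpos width code PySem.Set.empty 63 hle0).symm
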